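-- pv_equiv track=rewrite | github.com/ho991217/Python | BOJ/Basic/[1157] WordTraining.py | solution
-- ===== SOURCE A (Python) =====
-- def solution(word):
--     frequency = dict()
--
--     for i in word:
--         i = i.upper()
--         if i not in frequency: frequency[i] = 1
--         else: frequency[i] += 1
--
--     frq = [k for k, v in frequency.items() if v == max(frequency.values())]
--
--     if len(frq) > 1: return '?'
--
--     return frq[0]
-- ===== SOURCE B (Python) =====
-- def solution(word):
--     freq = {}
--     for ch in word:
--         ch = ch.upper()
--         freq[ch] = freq.get(ch, 0) + 1
--     best_c, best_n, tie = '?', 0, False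
--     for c, n in freq.items():
--         if n > best_n:
--             best_c, best_n, tie = c, n, False
--         elif n == best_n:
--             tie = True
--     return '?' if tie else best_c
-- ===== Notes on version B (the rewrite author's own statement) =====
-- stated objective: alternative
-- what changed: replaces the filter comprehension that recomputes max(frequency.values()) for every item with a single pass over the counts tracking the running best count, its first key and a tie flag
-- crash fix: on the empty string A raises IndexError (frq[0] on the empty list) while B returns '?' — e.g. on solution(""): A raises IndexError, B returns "?"
import Mathlib
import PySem

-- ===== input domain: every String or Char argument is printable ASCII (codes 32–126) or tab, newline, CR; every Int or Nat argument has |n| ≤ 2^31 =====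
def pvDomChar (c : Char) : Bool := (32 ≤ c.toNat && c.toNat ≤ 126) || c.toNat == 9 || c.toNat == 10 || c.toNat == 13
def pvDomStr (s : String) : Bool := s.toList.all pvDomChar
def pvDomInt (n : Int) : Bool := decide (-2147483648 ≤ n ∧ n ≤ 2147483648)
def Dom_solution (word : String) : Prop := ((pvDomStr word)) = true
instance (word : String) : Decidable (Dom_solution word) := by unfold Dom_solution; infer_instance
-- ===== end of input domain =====

-- B replaces A's per-item recomputation of max(frequency.values()) by one pass over the
-- counts tracking the running best count, its first key and a tie flag (same return value).

-- ===== PORT A =====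
-- frequency build: 'if i not in frequency: frequency[i] = 1 else: frequency[i] += 1'
def solution (word : String) : String :=
  let frequency := word.toList.foldl
    (fun d c =>
      let i := PySem.Chars.upperChar c
      match d.get? i with
      | none => d.insert i 1
      | some v => d.insert i (v + (1 : Int)))
    PySem.Dict.empty
  -- '[k for k, v in frequency.items() if v == max(frequency.values())]' (max recomputed per item)
  let frq := (frequency.items.filter
      (fun p => PySem.List.max? frequency.values (fun v => v) == some p.2)).map Prod.fst
  if frq.length > 1 then "?"
  else ((frq.head?).map (fun c => String.ofList [c])).getD ""  -- frq[0]: IndexError (frq = []) excluded by Pre_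

-- ===== PORT B =====
def altStep (st : Char × Int × Bool) (p : Char × Int) : Char × Int × Bool :=
  if p.2 > st.2.1 then (p.1, p.2, false)
  else if p.2 == st.2.1 then (st.1, st.2.1, true)
  else st

def solution_alt (word : String) : String :=
  let freq := word.toList.foldl
    (fun d c =>
      let u := PySem.Chars.upperChar c
      d.insert u (d.getD u 0 + 1))
    PySem.Dict.empty
  let r := freq.items.foldl altStep ('?', 0, false)
  if r.2.2 then "?" else String.ofList [r.1]

-- ===== PRECONDITION & SPEC =====
-- Pre_ excludes only the empty string, on which A raises IndexError (frq[0] on []).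
def Pre_solution (word : String) : Prop := word ≠ ""
instance (word : String) : Decidable (Pre_solution word) := by unfold Pre_solution; infer_instance
def pvWitness_solution : String := "aA"

-- on the empty string A raises IndexError (frq[0] on the empty list) while B returns "?"
def Raises_solution (word : String) : Prop := word = ""
instance (word : String) : Decidable (Raises_solution word) := by unfold Raises_solution; infer_instance
def pvRaiseWitness_solution : String := ""
def pvRaiseWitnessOut_solution : String := "?"

def Spec_solution (word : String) (out : String) : Prop := out = solution_alt word
instance (word : String) (out : String) : Decidable (Spec_solution word out) := by unfold Spec_solution; infer_instance

-- ===== CLAIM (what is proved, stated in full; the proofs are below) =====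
def Claim_equal_solution : Prop := ∀ (word : String), Dom_solution word → Pre_solution word → Spec_solution word (solution word)
def Claim_raises_solution : Prop := (∀ (word : String), Dom_solution word → Raises_solution word → ¬ Pre_solution word) ∧ (Dom_solution (pvRaiseWitness_solution) ∧ Raises_solution (pvRaiseWitness_solution) ∧ solution_alt (pvRaiseWitness_solution) = pvRaiseWitnessOut_solution)

-- ===== LEMMAS AND PROOFS =====

theorem le_foldl_max_init (L : List Int) (a : Int) : a ≤ L.foldl max a := by
  induction L generalizing a with
  | nil => simp
  | cons h t ih =>
    simp only [List.foldl_cons]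
    exact le_trans (le_max_left a h) (ih (max a h))

theorem le_foldl_max_mem (L : List Int) (a : Int) : ∀ x ∈ L, x ≤ L.foldl max a := by
  induction L generalizing a with
  | nil => intro x hx; simp at hx
  | cons h t ih =>
    intro x hx
    simp only [List.foldl_cons]
    rcases List.mem_cons.mp hx with h1 | h1
    · subst h1
      exact le_trans (le_max_right a x) (le_foldl_max_init t (max a x))
    · exact ih (max a h) x h1

theorem foldl_max_mem (L : List Int) (a : Int) : L.foldl max a = a ∨ L.foldl max a ∈ L := by
  induction L generalizing a with
  | nil => simp
  | cons h t ih =>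
    simp only [List.foldl_cons]
    rcases ih (max a h) with h1 | h1
    · rcases le_or_gt a h with h2 | h2
      · right; rw [h1, max_eq_right h2]; exact List.mem_cons_self
      · left; rw [h1, max_eq_left (le_of_lt h2)]
    · right; exact List.mem_cons_of_mem h h1

/-- running max of the values, seeded with 0 -/
def vmax (L : List (Char × Int)) : Int := (L.map Prod.snd).foldl max 0

theorem vmax_append (L : List (Char × Int)) (x : Char × Int) :
    vmax (L ++ [x]) = max (vmax L) x.2 := by
  simp [vmax]

theorem le_vmax {L : List (Char × Int)} {p : Char × Int} (hp : p ∈ L) : p.2 ≤ vmax L :=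
  le_foldl_max_mem (L.map Prod.snd) 0 p.2 (List.mem_map_of_mem hp)

theorem vmax_attained {L : List (Char × Int)} (hL : L ≠ [])
    (hpos : ∀ p ∈ L, 0 < p.2) : ∃ p ∈ L, p.2 = vmax L := by
  rcases foldl_max_mem (L.map Prod.snd) 0 with h | h
  · exfalso
    rcases List.exists_mem_of_ne_nil L hL with ⟨q, hq⟩
    have := le_vmax hq
    have := hpos q hq
    simp only [vmax] at *
    omega
  · rcases List.mem_map.mp h with ⟨p, hp, hp2⟩
    exact ⟨p, hp, by simpa [vmax] using hp2⟩

theorem max?_eq_vmax {L : List (Char × Int)} (hL : L ≠ []) (hpos : ∀ p ∈ L, 0 < p.2) :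
    PySem.List.max? (L.map Prod.snd) (fun v => v) = some (vmax L) := by
  cases L with
  | nil => exact absurd rfl hL
  | cons h t =>
    rw [List.map_cons, PySem.List.max?_id_cons]
    have h0 : 0 < h.2 := hpos h (List.mem_cons_self)
    simp only [vmax, List.map_cons, List.foldl_cons]
    have : max 0 h.2 = h.2 := by omega
    rw [this]

theorem altStep_eq (c : Char) (m : Int) (t : Bool) (p : Char × Int) :
    altStep (c, m, t) p =
      if p.2 > m then (p.1, p.2, false) else if p.2 == m then (c, m, true) else (c, m, t) := rfl

/-- The characterisation of B's selection fold. -/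
theorem foldB_char (L : List (Char × Int)) (hL : L ≠ []) (hpos : ∀ p ∈ L, 0 < p.2) :
    L.foldl altStep ('?', 0, false) =
      (((L.filter (fun p => p.2 == vmax L)).headD ('?', 0)).1, vmax L,
        decide (1 < (L.filter (fun p => p.2 == vmax L)).length)) := by
  induction L using List.reverseRecOn with
  | nil => exact absurd rfl hL
  | append_singleton L x ih =>
    have hposL : ∀ p ∈ L, 0 < p.2 := fun p hp => hpos p (by simp [hp])
    have hxpos : 0 < x.2 := hpos x (by simp)
    rcases eq_or_ne L [] with hLe | hLne
    · subst hLe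
      have hm : vmax [x] = x.2 := by simp only [vmax, List.map_cons, List.map_nil,
        List.foldl_cons, List.foldl_nil]; omega
      simp only [List.nil_append, List.foldl_cons, List.foldl_nil, hm, List.filter_cons,
        List.filter_nil, beq_self_eq_true, if_true]
      rw [altStep_eq, if_pos hxpos]
      simp
    · rw [List.foldl_append, ih hLne hposL, vmax_append]
      rcases lt_trichotomy (vmax L) x.2 with hc | hc | hc
      · -- new strict max: old max elements all below x.2
        have hmx : max (vmax L) x.2 = x.2 := by omega
        have hfL : L.filter (fun p => p.2 == x.2) = [] := by
          rw [List.filter_eq_nil_iff]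
          intro p hp
          have := le_vmax hp
          simp only [beq_iff_eq]
          omega
        have hfx : (x.2 == x.2) = true := by simp
        simp only [List.foldl_cons, List.foldl_nil, hmx, List.filter_append, hfL,
          List.filter_cons, List.filter_nil, hfx, if_true, List.nil_append]
        rw [altStep_eq, if_pos hc]
        simp
      · -- tie with the old max
        have hmx : max (vmax L) x.2 = vmax L := by omega
        have hfx : (x.2 == vmax L) = true := by simp [hc]
        rcases vmax_attained hLne hposL with ⟨q, hq, hq2⟩
        have hfLne : L.filter (fun p => p.2 == vmax L) ≠ [] := by
          intro hnil
          have := List.filter_eq_nil_iff.mp hnil q hq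
          simp [hq2] at this
        have hposlen : 0 < (L.filter (fun p => p.2 == vmax L)).length :=
          List.length_pos_iff.mpr hfLne
        simp only [List.foldl_cons, List.foldl_nil, hmx, List.filter_append,
          List.filter_cons, List.filter_nil, hfx, if_true]
        have hlen : 1 < (L.filter (fun p => p.2 == vmax L) ++ [x]).length := by
          simp only [List.length_append, List.length_cons, List.length_nil]
          omega
        have hhead : ((L.filter (fun p => p.2 == vmax L) ++ [x]).headD ('?', 0)) =
            ((L.filter (fun p => p.2 == vmax L)).headD ('?', 0)) := by
          cases h : L.filter (fun p => p.2 == vmax L) with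
          | nil => exact absurd h hfLne
          | cons a t => simp
        rw [hhead, decide_eq_true hlen]
        rw [altStep_eq, if_neg (by omega), if_pos hfx]
      · -- below the old max: nothing changes
        have hmx : max (vmax L) x.2 = vmax L := by omega
        have hfx : (x.2 == vmax L) = false := by simp; omega
        simp only [List.foldl_cons, List.foldl_nil, hmx, List.filter_append,
          List.filter_cons, List.filter_nil, hfx, Bool.false_eq_true, if_false, List.append_nil]
        rw [altStep_eq, if_neg (by omega), if_neg (by simp [hfx])]

/-- both dict builds equal `PySem.Dict.counter` of the uppercased characters -/
theorem buildA_eq_counter (cs : List Char) :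
    cs.foldl (fun d c =>
        let i := PySem.Chars.upperChar c
        match d.get? i with
        | none => d.insert i 1
        | some v => d.insert i (v + (1 : Int)))
      PySem.Dict.empty
    = PySem.Dict.counter (cs.map PySem.Chars.upperChar) := by
  rw [← PySem.Dict.foldl_insert_getD_add_one_eq_counter, List.foldl_map]
  apply PySem.List.foldl_congr_mem
  intro d c _
  simp only
  cases h : d.get? (PySem.Chars.upperChar c) with
  | none => simp [PySem.Dict.getD_of_get?_eq_none (h := h)]
  | some v => simp [PySem.Dict.getD_of_get?_eq_some (h := h)]

theorem buildB_eq_counter (cs : List Char) :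
    cs.foldl (fun d c =>
        let u := PySem.Chars.upperChar c
        d.insert u (d.getD u 0 + 1))
      PySem.Dict.empty
    = PySem.Dict.counter (cs.map PySem.Chars.upperChar) := by
  rw [← PySem.Dict.foldl_insert_getD_add_one_eq_counter, List.foldl_map]

theorem counter_items_pos (cs : List Char) :
    ∀ p ∈ (PySem.Dict.counter (cs.map PySem.Chars.upperChar)).items, 0 < p.2 := by
  intro p hp
  rw [PySem.Dict.items_counter] at hp
  rcases List.mem_map.mp hp with ⟨k, hk, hk2⟩
  have hkmem : k ∈ cs.map PySem.Chars.upperChar := (PySem.Set.mem_ofList _ _).mp hk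
  have : 0 < (cs.map PySem.Chars.upperChar).count k := List.count_pos_iff.mpr hkmem
  subst hk2
  simpa using this

theorem counter_items_ne_nil {cs : List Char} (hcs : cs ≠ []) :
    (PySem.Dict.counter (cs.map PySem.Chars.upperChar)).items ≠ [] := by
  rw [PySem.Dict.items_counter]
  intro h
  rcases List.exists_mem_of_ne_nil cs hcs with ⟨c, hc⟩
  have hm : PySem.Chars.upperChar c ∈ PySem.Set.ofList (cs.map PySem.Chars.upperChar) :=
    (PySem.Set.mem_ofList _ _).mpr (List.mem_map_of_mem hc)
  rw [List.map_eq_nil_iff.mp h] at hm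
  simp at hm

-- ===== VERDICT (by name: the statement is the Claim_ definition above) =====
theorem solution_spec : Claim_equal_solution := by
  intro word _ hpre
  unfold Spec_solution
  have hcs : word.toList ≠ [] := by
    intro h
    exact hpre (by simpa using congrArg String.ofList h)
  simp only [solution, solution_alt]
  rw [buildA_eq_counter, buildB_eq_counter]
  set d := PySem.Dict.counter (word.toList.map PySem.Chars.upperChar) with hd
  have hpos := counter_items_pos word.toList
  have hne : d.items ≠ [] := counter_items_ne_nil hcs
  have hvals : d.values = d.items.map Prod.snd := rfl
  rw [foldB_char d.items hne hpos]
  rw [hvals, max?_eq_vmax hne hpos]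
  set L := d.items
  set M := vmax L with hM
  have hfilt : L.filter (fun p => (some M == some p.2)) = L.filter (fun p => p.2 == M) := by
    apply List.filter_congr
    intro p _
    simp [eq_comm]
  rw [hfilt]
  set F := L.filter (fun p => p.2 == M) with hF
  have hFne : F ≠ [] := by
    rcases vmax_attained hne hpos with ⟨q, hq, hq2⟩
    intro hnil
    have := List.filter_eq_nil_iff.mp hnil q hq
    simp [hq2] at this
    exact this hM.symm
  by_cases htie : 1 < F.length
  · simp [htie]
  · have hlen : (F.map Prod.fst).length ≤ 1 := by
      rw [List.length_map]; omega
    cases hFc : F with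
    | nil => exact absurd hFc hFne
    | cons a t =>
      have ht : t = [] := by
        cases t with
        | nil => rfl
        | cons b u =>
          exfalso
          apply htie
          rw [hFc]
          simp
      subst ht
      simp

@[simp] theorem solution_raises : Claim_raises_solution := by
  unfold Claim_raises_solution
  constructor
  · intro word _ hr hp; exact hp hr
  · exact ⟨by decide, by decide, by decide⟩
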